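-- pv_equiv track=rewrite | github.com/nronzel/forecast | conditions/condition_evaluators.py | filter_worst_conditions
-- ===== SOURCE A (Python) =====
-- def filter_worst_conditions(all_worst_conditions):
--     # Find the highest occurrence count
--     highest_occurrence = max(
--         details["counter"] for details in all_worst_conditions.values()
--     )
--
--     # Filter the conditions with the highest occurrence count
--     filtered_conditions = {
--         condition: details["score"]
--         for condition, details in all_worst_conditions.items()
--         if details["counter"] == highest_occurrence
--     }
--
--     # If needed, find the worst score among those with the highest occurrence
--     worst_score_among_highest_occurrence = min(filtered_conditions.values())
--
--     # Further filter by worst score if necessary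
--     final_filtered_conditions = {
--         condition: score
--         for condition, score in filtered_conditions.items()
--         if score == worst_score_among_highest_occurrence
--     }
--
--     return final_filtered_conditions
-- ===== SOURCE B (Python) =====
-- def filter_worst_conditions(all_worst_conditions):
--     # Single pass: track the best (counter, -score) key seen so far and the
--     # group of conditions achieving it; reset the group on a strictly better key.
--     best = None
--     result = {}
--     for condition, details in all_worst_conditions.items():
--         score = details["score"]
--         key = (details["counter"], -score)
--         if best is None or key > best:
--             best = key
--             result = {condition: score}
--         elif key == best:
--             result[condition] = score
--     return result
-- ===== Notes on version B (the rewrite author's own statement) =====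
-- stated objective: alternative
-- what changed: Replaces A's four passes (max of counters, filter by max, min of scores, filter by min) with a single pass that tracks the best (counter, -score) key and the insertion-ordered group of conditions achieving it, resetting the group on a strictly better key.
-- outside the precondition, e.g. on filter_worst_conditions({'a': {'counter': 0}, 'b': {'counter': 1, 'score': 2}}): A returns {'b': 2}, B raises KeyError
-- crash fix: On an empty dict A raises ValueError (max() of an empty sequence); B returns {}. — e.g. on filter_worst_conditions([]): A raises ValueError, B returns []
import Mathlib
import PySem

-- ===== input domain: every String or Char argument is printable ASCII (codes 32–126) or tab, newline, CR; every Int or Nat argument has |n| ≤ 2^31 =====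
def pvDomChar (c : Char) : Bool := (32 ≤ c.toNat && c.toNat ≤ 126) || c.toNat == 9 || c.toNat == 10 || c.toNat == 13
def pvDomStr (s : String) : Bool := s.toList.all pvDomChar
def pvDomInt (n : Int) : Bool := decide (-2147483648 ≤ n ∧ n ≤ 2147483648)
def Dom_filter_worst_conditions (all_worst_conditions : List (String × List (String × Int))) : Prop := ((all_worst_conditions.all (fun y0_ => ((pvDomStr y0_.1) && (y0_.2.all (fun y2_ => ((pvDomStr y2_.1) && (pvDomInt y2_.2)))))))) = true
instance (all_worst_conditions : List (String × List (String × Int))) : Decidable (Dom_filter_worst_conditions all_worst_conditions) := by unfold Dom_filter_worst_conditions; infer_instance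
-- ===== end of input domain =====

-- B replaces A's four passes (max of counters, filter, min of scores, filter) with one
-- pass tracking the best (counter, -score) key and the group achieving it; same value on Pre_.


-- ===== PORT A =====
-- details["k"]: first-match lookup in the inner dict; the default 0 only stands in for
-- the KeyError case, which Pre_ excludes.
def pvLook (d : List (String × Int)) (k : String) : Int :=
  ((PySem.Dict.mk d).get? k).getD 0

def filter_worst_conditions (all_worst_conditions : List (String × List (String × Int))) : List (String × Int) :=
  -- max(details["counter"] for details in values()); getD 0 stands for the ValueError on {}, excluded by Pre_
  let highest := (PySem.List.max? (all_worst_conditions.map (fun cd => pvLook cd.2 "counter")) (fun y => y)).getD 0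
  -- {condition: details["score"] for … if details["counter"] == highest}
  let filtered := (all_worst_conditions.filter (fun cd => pvLook cd.2 "counter" == highest)).map
      (fun cd => (cd.1, pvLook cd.2 "score"))
  -- min(filtered.values()); getD 0 again only reachable outside Pre_
  let worst := (PySem.List.min? (filtered.map (fun p => p.2)) (fun y => y)).getD 0
  -- {condition: score for … if score == worst}
  filtered.filter (fun p => p.2 == worst)

-- ===== PORT B =====
-- Python tuple comparison `key > best` on (counter, -score): lexicographic
def pvKeyGt (a b : Int × Int) : Bool := a.1 > b.1 || (a.1 == b.1 && a.2 > b.2)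

-- the for-loop of Source B; state = (best, result).  `result[condition] = score` appends:
-- exact, since the conditions are keys of a Python dict, hence distinct (Pre_).
def pvLoopB : List (String × List (String × Int)) → Option (Int × Int) → List (String × Int) → List (String × Int)
  | [], _, r => r
  | cd :: rest, best, r =>
    let s := pvLook cd.2 "score"
    let k := (pvLook cd.2 "counter", -s)
    match best with
    | none => pvLoopB rest (some k) [(cd.1, s)]
    | some b =>
      if pvKeyGt k b then pvLoopB rest (some k) [(cd.1, s)]
      else if k == b then pvLoopB rest (some b) (r ++ [(cd.1, s)])
      else pvLoopB rest (some b) r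

def filter_worst_conditions_alt (all_worst_conditions : List (String × List (String × Int))) : List (String × Int) :=
  pvLoopB all_worst_conditions none []

-- ===== PRECONDITION & SPEC =====
-- Pre_ excludes the empty dict (A's max() raises ValueError), inner dicts missing the
-- "counter" or "score" key (KeyError), and duplicate keys at either level, which cannot
-- occur in a genuine Python dict argument.
def Pre_filter_worst_conditions (all_worst_conditions : List (String × List (String × Int))) : Prop :=
  all_worst_conditions ≠ [] ∧ (all_worst_conditions.map Prod.fst).Nodup ∧
    ∀ p ∈ all_worst_conditions,
      (p.2.map Prod.fst).Nodup ∧ "counter" ∈ p.2.map Prod.fst ∧ "score" ∈ p.2.map Prod.fst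
instance (all_worst_conditions : List (String × List (String × Int))) : Decidable (Pre_filter_worst_conditions all_worst_conditions) := by unfold Pre_filter_worst_conditions; infer_instance

def pvWitness_filter_worst_conditions : (List (String × List (String × Int))) :=
  [("rain", [("counter", 2), ("score", 3)]), ("snow", [("counter", 2), ("score", 1)])]

-- On an empty dict A raises ValueError (max() of an empty sequence); B returns {}.
def Raises_filter_worst_conditions (all_worst_conditions : List (String × List (String × Int))) : Prop :=
  all_worst_conditions = []
instance (all_worst_conditions : List (String × List (String × Int))) : Decidable (Raises_filter_worst_conditions all_worst_conditions) := by unfold Raises_filter_worst_conditions; infer_instance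
def pvRaiseWitness_filter_worst_conditions : (List (String × List (String × Int))) := []
def pvRaiseWitnessOut_filter_worst_conditions : List (String × Int) := []

def Spec_filter_worst_conditions (all_worst_conditions : List (String × List (String × Int))) (out : List (String × Int)) : Prop := out = filter_worst_conditions_alt all_worst_conditions
instance (all_worst_conditions : List (String × List (String × Int))) (out : List (String × Int)) : Decidable (Spec_filter_worst_conditions all_worst_conditions out) := by unfold Spec_filter_worst_conditions; infer_instance

-- ===== CLAIM (what is proved, stated in full; the proofs are below) =====
def Claim_equal_filter_worst_conditions : Prop := ∀ (all_worst_conditions : List (String × List (String × Int))), Dom_filter_worst_conditions all_worst_conditions → Pre_filter_worst_conditions all_worst_conditions → Spec_filter_worst_conditions all_worst_conditions (filter_worst_conditions all_worst_conditions)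
def Claim_raises_filter_worst_conditions : Prop := (∀ (all_worst_conditions : List (String × List (String × Int))), Dom_filter_worst_conditions all_worst_conditions → Raises_filter_worst_conditions all_worst_conditions → ¬ Pre_filter_worst_conditions all_worst_conditions) ∧ (Dom_filter_worst_conditions (pvRaiseWitness_filter_worst_conditions) ∧ Raises_filter_worst_conditions (pvRaiseWitness_filter_worst_conditions) ∧ filter_worst_conditions_alt (pvRaiseWitness_filter_worst_conditions) = pvRaiseWitnessOut_filter_worst_conditions)

-- ===== LEMMAS AND PROOFS =====

-- counter, score, lex key and output entry of one dict item
def pvC (cd : String × List (String × Int)) : Int := pvLook cd.2 "counter"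
def pvS (cd : String × List (String × Int)) : Int := pvLook cd.2 "score"
def pvKey (cd : String × List (String × Int)) : Int × Int := (pvC cd, -(pvS cd))
def pvEntry (cd : String × List (String × Int)) : String × Int := (cd.1, pvS cd)

-- running lex maximum of the keys, seeded with b (what B's loop maintains in `best`)
def pvFoldMax (b : Int × Int) (l : List (String × List (String × Int))) : Int × Int :=
  l.foldl (fun acc x => if pvKeyGt (pvKey x) acc then pvKey x else acc) b

theorem pvKeyGt_true_iff (a b : Int × Int) :
    pvKeyGt a b = true ↔ (b.1 < a.1 ∨ (b.1 = a.1 ∧ b.2 < a.2)) := by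
  simp [pvKeyGt]; omega

theorem pvKeyGt_false_iff (a b : Int × Int) :
    pvKeyGt a b = false ↔ (a.1 < b.1 ∨ (a.1 = b.1 ∧ a.2 ≤ b.2)) := by
  simp [pvKeyGt]; omega

theorem pvFoldMax_cons (b : Int × Int) (x : String × List (String × Int))
    (t : List (String × List (String × Int))) :
    pvFoldMax b (x :: t) = pvFoldMax (if pvKeyGt (pvKey x) b then pvKey x else b) t := rfl

theorem pvFoldMax_attained (l : List (String × List (String × Int))) (b : Int × Int) :
    pvFoldMax b l = b ∨ ∃ y ∈ l, pvFoldMax b l = pvKey y := by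
  induction l generalizing b with
  | nil => exact Or.inl rfl
  | cons x t ih =>
    rw [pvFoldMax_cons]
    by_cases h : pvKeyGt (pvKey x) b = true
    · rw [if_pos h]
      rcases ih (pvKey x) with h' | ⟨y, hy, h'⟩
      · exact Or.inr ⟨x, List.mem_cons_self, h'⟩
      · exact Or.inr ⟨y, List.mem_cons_of_mem _ hy, h'⟩
    · rw [if_neg h]
      rcases ih b with h' | ⟨y, hy, h'⟩
      · exact Or.inl h'
      · exact Or.inr ⟨y, List.mem_cons_of_mem _ hy, h'⟩

theorem pvFoldMax_ub (l : List (String × List (String × Int))) (b : Int × Int) :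
    pvKeyGt b (pvFoldMax b l) = false ∧ ∀ y ∈ l, pvKeyGt (pvKey y) (pvFoldMax b l) = false := by
  induction l generalizing b with
  | nil =>
    refine ⟨?_, by simp⟩
    simp only [pvFoldMax, List.foldl_nil]
    rw [pvKeyGt_false_iff]; omega
  | cons x t ih =>
    rw [pvFoldMax_cons]
    by_cases h : pvKeyGt (pvKey x) b = true
    · rw [if_pos h]
      obtain ⟨ih1, ih2⟩ := ih (pvKey x)
      refine ⟨?_, ?_⟩
      · have h1 := (pvKeyGt_false_iff _ _).mp ih1
        have h2 := (pvKeyGt_true_iff _ _).mp h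
        rw [pvKeyGt_false_iff]; omega
      · intro y hy
        rcases List.mem_cons.mp hy with rfl | hy
        · exact ih1
        · exact ih2 y hy
    · rw [if_neg h]
      obtain ⟨ih1, ih2⟩ := ih b
      refine ⟨ih1, ?_⟩
      intro y hy
      rcases List.mem_cons.mp hy with rfl | hy
      · have hf : pvKeyGt (pvKey y) b = false := by
          revert h; cases pvKeyGt (pvKey y) b <;> simp
        have h1 := (pvKeyGt_false_iff _ _).mp hf
        have h2 := (pvKeyGt_false_iff _ _).mp ih1
        rw [pvKeyGt_false_iff]; omega
      · exact ih2 y hy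

theorem pvLoopB_cons (cd : String × List (String × Int))
    (rest : List (String × List (String × Int))) (b : Int × Int) (r : List (String × Int)) :
    pvLoopB (cd :: rest) (some b) r =
      if pvKeyGt (pvKey cd) b then pvLoopB rest (some (pvKey cd)) [pvEntry cd]
      else if pvKey cd == b then pvLoopB rest (some b) (r ++ [pvEntry cd])
      else pvLoopB rest (some b) r := rfl

theorem pvLoopB_none_cons (cd : String × List (String × Int))
    (rest : List (String × List (String × Int))) (r : List (String × Int)) :
    pvLoopB (cd :: rest) none r = pvLoopB rest (some (pvKey cd)) [pvEntry cd] := rfl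

-- what B's loop computes from a `some` state
theorem pvLoopB_some (t : List (String × List (String × Int))) (b : Int × Int)
    (r : List (String × Int)) :
    pvLoopB t (some b) r =
      (if pvFoldMax b t = b then r else []) ++
        (t.filter (fun y => pvKey y == pvFoldMax b t)).map pvEntry := by
  induction t generalizing b r with
  | nil => simp [pvLoopB, pvFoldMax]
  | cons x t ih =>
    rw [pvLoopB_cons, pvFoldMax_cons]
    by_cases h : pvKeyGt (pvKey x) b = true
    · rw [if_pos h, if_pos h, ih (pvKey x) [pvEntry x]]
      have hne : pvFoldMax (pvKey x) t ≠ b := by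
        intro hEq
        have h1 := (pvFoldMax_ub t (pvKey x)).1
        rw [hEq, h] at h1
        exact Bool.noConfusion h1
      rw [if_neg hne, List.filter_cons]
      by_cases hx : pvFoldMax (pvKey x) t = pvKey x
      · rw [if_pos hx, if_pos (by simp [hx] : (pvKey x == pvFoldMax (pvKey x) t) = true)]
        simp
      · rw [if_neg hx,
          if_neg (by simp; intro hEq; exact hx hEq.symm :
            ¬ ((pvKey x == pvFoldMax (pvKey x) t) = true))]
        try simp
    · rw [if_neg h, if_neg h]
      by_cases he : pvKey x = b
      · rw [if_pos (by simp [he] : (pvKey x == b) = true), ih b (r ++ [pvEntry x]),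
          List.filter_cons]
        by_cases hMb : pvFoldMax b t = b
        · rw [if_pos hMb, if_pos hMb,
            if_pos (by simp [he, hMb] : (pvKey x == pvFoldMax b t) = true)]
          simp
        · rw [if_neg hMb, if_neg hMb,
            if_neg (by simp [he]; try (intro hEq; exact hMb hEq.symm) :
              ¬ ((pvKey x == pvFoldMax b t) = true))]
          try simp
      · rw [if_neg (by simp [he] : ¬ ((pvKey x == b) = true)), ih b r, List.filter_cons]
        have hf : pvKeyGt (pvKey x) b = false := by
          revert h; cases pvKeyGt (pvKey x) b <;> simp
        have hxM : ¬ ((pvKey x == pvFoldMax b t) = true) := by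
          simp
          intro hEq
          have hxb := (pvKeyGt_false_iff _ _).mp hf
          have hbM := (pvKeyGt_false_iff _ _).mp (pvFoldMax_ub t b).1
          rw [hEq] at hxb
          exact he (hEq.trans (Prod.ext (by omega) (by omega)))
        rw [if_neg hxM]

-- A's program, rewritten as one filter once the two extremal values are named
theorem A_char (l : List (String × List (String × Int))) (H W : Int)
    (hH : PySem.List.max? (l.map (fun cd => pvLook cd.2 "counter")) (fun y => y) = some H)
    (hW : PySem.List.min?
        (((l.filter (fun cd => pvLook cd.2 "counter" == H)).map
          (fun cd => (cd.1, pvLook cd.2 "score"))).map (fun p => p.2)) (fun y => y) = some W) :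
    filter_worst_conditions l =
      (l.filter (fun y => pvLook y.2 "counter" == H && pvLook y.2 "score" == W)).map
        (fun cd => (cd.1, pvLook cd.2 "score")) := by
  simp only [filter_worst_conditions, hH, Option.getD_some, hW, List.filter_map,
    List.filter_filter]
  apply congrArg
  apply List.filter_congr
  intro y _
  show (pvLook y.2 "score" == W && pvLook y.2 "counter" == H) = _
  rw [Bool.and_comm]

theorem key_beq (y : String × List (String × Int)) (M : Int × Int) :
    (pvKey y == M) = ((pvLook y.2 "counter" == M.1) && (pvLook y.2 "score" == -M.2)) := by
  obtain ⟨m1, m2⟩ := M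
  show ((pvC y == m1) && ((-(pvS y)) == m2)) = _
  congr 1
  by_cases h : pvS y = -m2
  · have h2 : -(pvS y) = m2 := by omega
    simp [h2]
    exact h
  · have h2 : ¬ (-(pvS y) = m2) := by omega
    simp [h2]
    exact h

theorem main_eq (l : List (String × List (String × Int))) :
    filter_worst_conditions l = filter_worst_conditions_alt l := by
  cases l with
  | nil => rfl
  | cons x t =>
    -- B's side: the loop keeps exactly the group attaining the running maximum key
    have hB : filter_worst_conditions_alt (x :: t) =
        ((x :: t).filter (fun y => pvKey y == pvFoldMax (pvKey x) t)).map pvEntry := by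
      show pvLoopB (x :: t) none [] = _
      rw [pvLoopB_none_cons, pvLoopB_some, List.filter_cons]
      by_cases hx : pvFoldMax (pvKey x) t = pvKey x
      · rw [if_pos hx, if_pos (by simp [hx] : (pvKey x == pvFoldMax (pvKey x) t) = true)]
        simp
      · rw [if_neg hx,
          if_neg (by simp; intro hEq; exact hx hEq.symm :
            ¬ ((pvKey x == pvFoldMax (pvKey x) t) = true))]
        simp
    set M := pvFoldMax (pvKey x) t with hMdef
    have hatt : ∃ y ∈ x :: t, pvKey y = M := by
      rcases pvFoldMax_attained t (pvKey x) with h | ⟨y, hy, h⟩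
      · exact ⟨x, List.mem_cons_self, h.symm⟩
      · exact ⟨y, List.mem_cons_of_mem _ hy, h.symm⟩
    have hub : ∀ y ∈ x :: t, pvKeyGt (pvKey y) M = false := by
      intro y hy
      rcases List.mem_cons.mp hy with rfl | hy
      · exact (pvFoldMax_ub t (pvKey y)).1
      · exact (pvFoldMax_ub t (pvKey x)).2 y hy
    obtain ⟨y0, hy0, hy0k⟩ := hatt
    -- A's side: name the two extremal values
    obtain ⟨H, hHsome⟩ : ∃ H,
        PySem.List.max? ((x :: t).map (fun cd => pvLook cd.2 "counter")) (fun y => y) = some H := by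
      cases hm : PySem.List.max? ((x :: t).map (fun cd => pvLook cd.2 "counter")) (fun y => y) with
      | none =>
        exfalso
        exact List.cons_ne_nil x t
          (List.map_eq_nil_iff.mp ((PySem.List.max?_eq_none_iff _ _).mp hm))
      | some v => exact ⟨v, rfl⟩
    have hHub : ∀ y ∈ x :: t, pvC y ≤ H := fun y hy =>
      PySem.List.max?_isMax hHsome _ (List.mem_map.mpr ⟨y, hy, rfl⟩)
    have hHM : H = M.1 := by
      obtain ⟨v, hvmem, hveq⟩ := List.mem_map.mp (PySem.List.max?_mem hHsome)
      have h1 : M.1 ≤ H := by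
        have := hHub y0 hy0
        rw [show pvC y0 = M.1 from congrArg Prod.fst hy0k] at this
        exact this
      have h2 := (pvKeyGt_false_iff _ _).mp (hub v hvmem)
      have h3 : pvC v = H := hveq
      simp only [pvKey] at h2
      omega
    have hgy0 : y0 ∈ (x :: t).filter (fun cd => pvLook cd.2 "counter" == H) := by
      rw [List.mem_filter]
      exact ⟨hy0, by
        have : pvC y0 = M.1 := congrArg Prod.fst hy0k
        simp [show pvLook y0.2 "counter" = pvC y0 from rfl, this, hHM]⟩
    obtain ⟨W, hWsome⟩ : ∃ W, PySem.List.min?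
        ((((x :: t).filter (fun cd => pvLook cd.2 "counter" == H)).map
          (fun cd => (cd.1, pvLook cd.2 "score"))).map (fun p => p.2)) (fun y => y) = some W := by
      cases hm : PySem.List.min?
          ((((x :: t).filter (fun cd => pvLook cd.2 "counter" == H)).map
            (fun cd => (cd.1, pvLook cd.2 "score"))).map (fun p => p.2)) (fun y => y) with
      | none =>
        exfalso
        have := (PySem.List.min?_eq_none_iff _ _).mp hm
        rw [List.map_eq_nil_iff, List.map_eq_nil_iff] at this
        exact (List.ne_nil_of_mem hgy0) this
      | some v => exact ⟨v, rfl⟩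
    have hWlb : ∀ y ∈ (x :: t).filter (fun cd => pvLook cd.2 "counter" == H), W ≤ pvS y := by
      intro y hy
      exact PySem.List.min?_isMin hWsome _
        (by
          rw [List.map_map]
          exact List.mem_map.mpr ⟨y, hy, rfl⟩)
    have hWM : W = -M.2 := by
      have h1 : W ≤ -M.2 := by
        have := hWlb y0 hgy0
        have hs : pvS y0 = -M.2 := by
          have := congrArg Prod.snd hy0k
          simp only [pvKey] at this
          omega
        rw [hs] at this
        exact this
      obtain ⟨z, hz, hzs⟩ := List.mem_map.mp (by
        have := PySem.List.min?_mem hWsome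
        rw [List.map_map] at this
        exact this)
      have hzl : z ∈ x :: t := (List.mem_filter.mp hz).1
      have hzc : pvC z = M.1 := by
        have := (List.mem_filter.mp hz).2
        rw [hHM] at this
        simpa using this
      have h2 := (pvKeyGt_false_iff _ _).mp (hub z hzl)
      simp only [pvKey] at h2
      have hzs' : pvS z = W := hzs
      omega
    -- both results are the same filtered map
    rw [A_char (x :: t) H W hHsome hWsome, hB]
    have hmap : ∀ y : String × List (String × Int), (y.1, pvLook y.2 "score") = pvEntry y :=
      fun y => rfl
    simp only [hmap]
    congr 1
    apply List.filter_congr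
    intro y _
    rw [key_beq, hHM, hWM]

-- ===== VERDICT (by name: the statement is the Claim_ definition above) =====
theorem filter_worst_conditions_spec : Claim_equal_filter_worst_conditions := by
  intro l _ _
  exact main_eq l

def filter_worst_conditions_raises : Claim_raises_filter_worst_conditions := by
  unfold Claim_raises_filter_worst_conditions
  exact ⟨fun l _ h hp => hp.1 h, by decide⟩
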